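-- pv_equiv track=rewrite | github.com/ppravdin/patchcord | patchcord/core/attachments.py | mime_type_allowed
-- ===== SOURCE A (Python) =====
-- def normalize_mime_type(value: str) -> str:
--     return value.strip().lower().split(";", 1)[0]
--
-- def mime_type_allowed(mime_type: str, allowed: list[str]) -> bool:
--     normalized = normalize_mime_type(mime_type)
--     if not normalized:
--         return False
--     for pattern in allowed:
--         candidate = normalize_mime_type(pattern)
--         if not candidate:
--             continue
--         if candidate.endswith("/*") and normalized.startswith(candidate[:-1]):
--             return True
--         if normalized == candidate:
--             return True
--     return False
-- ===== SOURCE B (Python) =====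
-- def normalize_mime_type(value: str) -> str:
--     return value.strip().lower().split(";", 1)[0]
--
-- def mime_type_allowed(mime_type: str, allowed: list[str]) -> bool:
--     normalized = normalize_mime_type(mime_type)
--     if not normalized:
--         return False
--     # Invert the wildcard: enumerate every pattern string that could accept
--     # `normalized` (itself, plus each prefix ending in '/' with '*' appended),
--     # then just look each allowed candidate up in that key set.
--     keys = {normalized}
--     for i, ch in enumerate(normalized):
--         if ch == '/':
--             keys.add(normalized[:i + 1] + '*')
--     return any(normalize_mime_type(pattern) in keys for pattern in allowed)
-- ===== Notes on version B (the rewrite author's own statement) =====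
-- stated objective: alternative
-- what changed: A loops over the allowed patterns testing each for a wildcard-prefix or exact match against the query; B inverts the wildcard: it precomputes from the normalized query alone the finite set of pattern strings that could accept it (the query itself plus each '/'-ending prefix with '*' appended) and then reduces each allowed pattern to a single set-membership lookup.
import Mathlib
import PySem

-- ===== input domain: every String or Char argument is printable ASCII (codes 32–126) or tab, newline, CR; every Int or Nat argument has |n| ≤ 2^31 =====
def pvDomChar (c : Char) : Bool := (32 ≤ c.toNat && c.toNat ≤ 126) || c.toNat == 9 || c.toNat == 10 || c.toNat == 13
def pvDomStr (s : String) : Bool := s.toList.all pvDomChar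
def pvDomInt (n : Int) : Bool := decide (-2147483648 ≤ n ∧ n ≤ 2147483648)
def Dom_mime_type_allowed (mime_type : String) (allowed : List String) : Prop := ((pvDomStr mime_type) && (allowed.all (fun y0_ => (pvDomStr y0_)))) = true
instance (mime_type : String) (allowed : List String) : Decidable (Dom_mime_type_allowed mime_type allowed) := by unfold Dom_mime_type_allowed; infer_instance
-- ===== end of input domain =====

-- B inverts the wildcard: it enumerates every pattern string that could accept the normalized query (the query itself plus each '/'-ending prefix with '*' appended) and then just looks each allowed candidate up in that key set (alternative algorithm, same cost).


-- ===== PORT A =====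
-- value.strip().lower().split(";", 1)[0] ; split with nonempty sep always returns a nonempty list, so [0] = headD ""
def normalizeMime (value : String) : String :=
  ((PySem.Str.splitMax? (PySem.Str.lower (PySem.Str.strip value)) ";" 1).getD []).headD ""

def mimeLoopA (normalized : String) : List String → Bool
  | [] => false
  | pattern :: rest =>
    let candidate := normalizeMime pattern
    if candidate = "" then mimeLoopA normalized rest
    else if PySem.Str.endswith candidate "/*" &&
            PySem.Str.startswith normalized (PySem.Str.slice candidate none (some (-1))) then true
    else if normalized = candidate then true
    else mimeLoopA normalized rest

def mime_type_allowed (mime_type : String) (allowed : List String) : Bool :=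
  let normalized := normalizeMime mime_type
  if normalized = "" then false
  else mimeLoopA normalized allowed

-- ===== PORT B =====
-- keys = {normalized} ∪ { normalized[:i+1] + '*' : normalized[i] = '/' }  (strings as char lists)
def mimeKeysB (n : List Char) : PySem.Set (List Char) :=
  (PySem.List.enumerate n 0).foldl
    (fun keys ic =>
      if ic.2 = '/' then
        PySem.Set.add keys (PySem.List.slice n none (some (ic.1 + 1)) ++ ['*'])
      else keys)
    (PySem.Set.add PySem.Set.empty n)

def mime_type_allowed_alt (mime_type : String) (allowed : List String) : Bool :=
  let normalized := (normalizeMime mime_type).toList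
  if normalized = [] then false
  else
    let keys := mimeKeysB normalized
    allowed.any (fun pattern => PySem.Set.contains keys (normalizeMime pattern).toList)

-- ===== PRECONDITION & SPEC =====
def Spec_mime_type_allowed (mime_type : String) (allowed : List String) (out : Bool) : Prop := out = mime_type_allowed_alt mime_type allowed
instance (mime_type : String) (allowed : List String) (out : Bool) : Decidable (Spec_mime_type_allowed mime_type allowed out) := by unfold Spec_mime_type_allowed; infer_instance

-- ===== CLAIM =====
def Claim_equal_mime_type_allowed : Prop := ∀ (mime_type : String) (allowed : List String), Dom_mime_type_allowed mime_type allowed → Spec_mime_type_allowed mime_type allowed (mime_type_allowed mime_type allowed)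

-- ===== LEMMAS AND PROOFS =====

-- the per-pattern match A implements
def mimeMatch (n p : String) : Bool :=
  let c := normalizeMime p
  !(c = "") && ((PySem.Str.endswith c "/*" &&
                 PySem.Str.startswith n (PySem.Str.slice c none (some (-1)))) || n == c)

theorem mimeLoopA_eq_any (n : String) (l : List String) :
    mimeLoopA n l = l.any (fun p => mimeMatch n p) := by
  induction l with
  | nil => rfl
  | cons p rest ih =>
    rw [List.any_cons, ← ih]
    show (if normalizeMime p = "" then mimeLoopA n rest
          else if PySem.Str.endswith (normalizeMime p) "/*" &&
                  PySem.Str.startswith n (PySem.Str.slice (normalizeMime p) none (some (-1))) then true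
          else if n = normalizeMime p then true
          else mimeLoopA n rest) = (mimeMatch n p || mimeLoopA n rest)
    split_ifs <;> simp_all [mimeMatch]

theorem mem_mimeFold (n : List Char) (l : List (Int × Char)) (acc : PySem.Set (List Char)) (x : List Char) :
    x ∈ l.foldl (fun keys ic =>
        if ic.2 = '/' then
          PySem.Set.add keys (PySem.List.slice n none (some (ic.1 + 1)) ++ ['*'])
        else keys) acc
    ↔ x ∈ acc ∨ ∃ ic ∈ l, ic.2 = '/' ∧ x = PySem.List.slice n none (some (ic.1 + 1)) ++ ['*'] := by
  induction l generalizing acc with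
  | nil => simp
  | cons ic rest ih =>
    rw [List.foldl_cons, ih]
    by_cases h : ic.2 = '/'
    · rw [if_pos h, PySem.Set.mem_add]
      simp only [List.mem_cons]
      constructor
      · rintro ((hx | hx) | ⟨jc, hj, hs, hxx⟩)
        · exact Or.inl hx
        · exact Or.inr ⟨ic, Or.inl rfl, h, hx⟩
        · exact Or.inr ⟨jc, Or.inr hj, hs, hxx⟩
      · rintro (hx | ⟨jc, (rfl | hj), hs, hxx⟩)
        · exact Or.inl (Or.inl hx)
        · exact Or.inl (Or.inr hxx)
        · exact Or.inr ⟨jc, hj, hs, hxx⟩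
    · rw [if_neg h]
      simp only [List.mem_cons]
      constructor
      · rintro (hx | ⟨jc, hj, hs, hxx⟩)
        · exact Or.inl hx
        · exact Or.inr ⟨jc, Or.inr hj, hs, hxx⟩
      · rintro (hx | ⟨jc, (rfl | hj), hs, hxx⟩)
        · exact Or.inl hx
        · exact absurd hs h
        · exact Or.inr ⟨jc, hj, hs, hxx⟩

theorem mem_mimeKeysB (n x : List Char) :
    x ∈ mimeKeysB n ↔
      x = n ∨ ∃ (k : Nat), ∃ (_ : k < n.length), n[k] = '/' ∧ x = n.take (k + 1) ++ ['*'] := by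
  rw [mimeKeysB, mem_mimeFold, PySem.Set.mem_add]
  simp only [PySem.Set.empty, List.not_mem_nil, false_or]
  constructor
  · rintro (h | ⟨ic, hmem, hsl, hx⟩)
    · exact Or.inl h
    · rw [PySem.List.mem_enumerate_iff] at hmem
      obtain ⟨k, hk, rfl⟩ := hmem
      refine Or.inr ⟨k, hk, hsl, ?_⟩
      rw [hx]
      have hcast : (0 : Int) + (k : Int) + 1 = ((k + 1 : Nat) : Int) := by push_cast; ring
      rw [hcast, PySem.List.slice_to_natCast]
  · rintro (h | ⟨k, hk, hget, hx⟩)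
    · exact Or.inl h
    · refine Or.inr ⟨((0 : Int) + k, n[k]), ?_, hget, ?_⟩
      · rw [PySem.List.mem_enumerate_iff]; exact ⟨k, hk, rfl⟩
      · rw [hx]
        have hcast : (0 : Int) + (k : Int) + 1 = ((k + 1 : Nat) : Int) := by push_cast; ring
        rw [hcast, PySem.List.slice_to_natCast]

-- the wildcard clause of A, characterized as "x is a '/'-ending prefix of n with '*' appended"
theorem wildcard_iff (n c : List Char) :
    (['/', '*'] <:+ c ∧ c.dropLast <+: n) ↔
      ∃ (k : Nat), ∃ (_ : k < n.length), n[k] = '/' ∧ c = n.take (k + 1) ++ ['*'] := by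
  constructor
  · rintro ⟨⟨d, rfl⟩, hpre⟩
    have hdl : (d ++ ['/', '*']).dropLast = d ++ ['/'] := by
      have h2 : d ++ ['/', '*'] = (d ++ ['/']) ++ ['*'] := by simp
      rw [h2, List.dropLast_concat]
    rw [hdl] at hpre
    have hlen : d.length + 1 ≤ n.length := by
      have := hpre.length_le; simpa using this
    have hklt : d.length < (d ++ ['/']).length := by simp
    have hget : n[d.length]'(by omega) = (d ++ ['/'])[d.length]'hklt := (hpre.getElem hklt).symm
    refine ⟨d.length, by omega, ?_, ?_⟩
    · rw [hget]; simp
    · have htake : d ++ ['/'] = n.take (d.length + 1) := by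
        have h3 := List.prefix_iff_eq_take.mp hpre
        simpa using h3
      rw [← htake]; simp
  · rintro ⟨k, hk, hget, rfl⟩
    have htake : n.take (k + 1) = n.take k ++ ['/'] := by
      rw [List.take_add_one]
      simp [List.getElem?_eq_getElem hk, hget]
    constructor
    · rw [htake, List.append_assoc]
      exact List.suffix_append _ _
    · rw [htake, List.dropLast_concat, ← htake]
      exact List.take_prefix _ _

-- core of the match equivalence, for an arbitrary candidate string c
theorem mimeMatch_core (n c : String) (hn : n ≠ "") :
    (!(decide (c = "")) && ((PySem.Str.endswith c "/*" &&
       PySem.Str.startswith n (PySem.Str.slice c none (some (-1)))) || n == c))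
    = PySem.Set.contains (mimeKeysB n.toList) c.toList := by
  rw [Bool.eq_iff_iff, PySem.Set.contains_iff, mem_mimeKeysB]
  simp only [Bool.and_eq_true, Bool.or_eq_true, Bool.not_eq_true',
    decide_eq_false_iff_not, beq_iff_eq,
    PySem.Str.endswith_eq, PySem.Str.startswith_eq]
  rw [show ("/*" : String).toList = ['/', '*'] by simp]
  rw [PySem.Chars.endswith_iff, PySem.Chars.startswith_iff, PySem.Str.slice_to_neg_one,
    ← wildcard_iff n.toList c.toList]
  constructor
  · rintro ⟨hne, h | hnc⟩
    · exact Or.inr h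
    · exact Or.inl (congrArg String.toList hnc.symm)
  · rintro (h | h)
    · have hcn : c = n := String.toList_inj.mp h
      refine ⟨?_, Or.inr hcn.symm⟩
      rw [hcn]; exact hn
    · refine ⟨?_, Or.inl h⟩
      intro hcempty
      obtain ⟨hsuf, -⟩ := h
      have hlen := hsuf.length_le
      have hce : c.toList = [] := by rw [hcempty]; simp
      rw [hce] at hlen
      simp at hlen

theorem mimeMatch_eq_contains (n p : String) (hn : n ≠ "") :
    mimeMatch n p = PySem.Set.contains (mimeKeysB n.toList) (normalizeMime p).toList :=
  mimeMatch_core n (normalizeMime p) hn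

-- ===== VERDICT =====
theorem mime_type_allowed_spec : Claim_equal_mime_type_allowed := by
  intro m al _
  show mime_type_allowed m al = mime_type_allowed_alt m al
  simp only [mime_type_allowed, mime_type_allowed_alt]
  by_cases h : normalizeMime m = ""
  · have h' : (normalizeMime m).toList = [] := String.toList_eq_nil_iff.mpr h
    rw [if_pos h, if_pos h']
  · have h' : ¬((normalizeMime m).toList = []) := fun hh => h (String.toList_eq_nil_iff.mp hh)
    rw [if_neg h, if_neg h', mimeLoopA_eq_any]
    have hf : (fun p => mimeMatch (normalizeMime m) p)
        = (fun pattern => PySem.Set.contains (mimeKeysB (normalizeMime m).toList) (normalizeMime pattern).toList) :=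
      funext fun p => mimeMatch_eq_contains (normalizeMime m) p h
    rw [hf]
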